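-- pv_equiv track=rewrite | github.com/prasanna00019/AI-Agents-Hub | ContentGeneration/backend/services/content_service.py | _instruction_needs_research
-- ===== SOURCE A (Python) =====
-- def _instruction_needs_research(instruction: str) -> bool:
--     lowered = instruction.lower()
--     triggers = [
--         "update",
--         "latest",
--         "current",
--         "new source",
--         "new sources",
--         "fact-check",
--         "fact check",
--         "verify",
--         "research",
--         "search",
--         "add data",
--         "add stats",
--     ]
--     return any(token in lowered for token in triggers)
-- ===== SOURCE B (Python) =====
-- _TRIGGERS = (
--     "update",
--     "latest",
--     "current",
--     "new source",
--     "new sources",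
--     "fact-check",
--     "fact check",
--     "verify",
--     "research",
--     "search",
--     "add data",
--     "add stats",
-- )
--
--
-- def _instruction_needs_research(instruction: str) -> bool:
--     # Single left-to-right scan: at each position check whether any trigger
--     # starts there, instead of running a separate substring search per trigger.
--     lowered = instruction.lower()
--     for i in range(len(lowered) + 1):
--         for t in _TRIGGERS:
--             if lowered.startswith(t, i):
--                 return True
--     return False
-- ===== Notes on version B (the rewrite author's own statement) =====
-- stated objective: alternative
-- what changed: A runs one independent substring search per trigger over the lowered string; B makes a single left-to-right scan of the lowered string, testing at each position whether any trigger starts there (a naive multi-pattern matcher).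
import Mathlib
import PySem

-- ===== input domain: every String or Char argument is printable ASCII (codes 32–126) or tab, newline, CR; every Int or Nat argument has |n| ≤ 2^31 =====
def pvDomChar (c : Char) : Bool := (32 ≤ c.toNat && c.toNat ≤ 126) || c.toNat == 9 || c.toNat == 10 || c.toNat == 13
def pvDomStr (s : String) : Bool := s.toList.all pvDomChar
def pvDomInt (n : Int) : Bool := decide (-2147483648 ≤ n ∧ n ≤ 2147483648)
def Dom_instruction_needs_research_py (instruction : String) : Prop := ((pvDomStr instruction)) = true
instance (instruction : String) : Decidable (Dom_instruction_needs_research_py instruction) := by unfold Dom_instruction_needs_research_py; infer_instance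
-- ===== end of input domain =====

-- B replaces the per-trigger substring searches with one left-to-right scan
-- testing each position for a trigger prefix (alternative algorithm, same result).

-- ===== PORT A =====
def pvTriggersA : List String :=
  ["update", "latest", "current", "new source", "new sources", "fact-check",
   "fact check", "verify", "research", "search", "add data", "add stats"]

def instruction_needs_research_py (instruction : String) : Bool :=
  let lowered := PySem.Str.lower instruction
  pvTriggersA.any (fun token => PySem.Str.isIn token lowered)

-- ===== PORT B =====
def pvTriggersB : List (List Char) :=
  ["update".toList, "latest".toList, "current".toList, "new source".toList,
   "new sources".toList, "fact-check".toList, "fact check".toList, "verify".toList,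
   "research".toList, "search".toList, "add data".toList, "add stats".toList]

-- the scan over positions i = 0 .. len: recursion over the suffixes of the string
def pvScan : List Char → Bool
  | [] => pvTriggersB.any (fun t => PySem.Chars.startswith [] t)
  | c :: rest =>
      pvTriggersB.any (fun t => PySem.Chars.startswith (c :: rest) t) || pvScan rest

def instruction_needs_research_py_alt (instruction : String) : Bool :=
  pvScan (PySem.Chars.lower instruction.toList)

-- ===== PRECONDITION & SPEC =====
def Spec_instruction_needs_research_py (instruction : String) (out : Bool) : Prop := out = instruction_needs_research_py_alt instruction
instance (instruction : String) (out : Bool) : Decidable (Spec_instruction_needs_research_py instruction out) := by unfold Spec_instruction_needs_research_py; infer_instance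

-- ===== CLAIM (what is proved, stated in full; the proofs are below) =====
def Claim_equal_instruction_needs_research_py : Prop := ∀ (instruction : String), Dom_instruction_needs_research_py instruction → Spec_instruction_needs_research_py instruction (instruction_needs_research_py instruction)

-- ===== LEMMAS AND PROOFS =====

theorem pvScan_eq_any_infix (cs : List Char) :
    pvScan cs = pvTriggersB.any (fun t => decide (t <:+: cs)) := by
  induction cs with
  | nil => rfl
  | cons c rest ih =>
      rw [pvScan, ih, Bool.eq_iff_iff]
      simp only [Bool.or_eq_true, List.any_eq_true,
        PySem.Chars.startswith_iff, decide_eq_true_eq, List.infix_cons_iff]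
      constructor
      · rintro (⟨t, ht, h⟩ | ⟨t, ht, h⟩)
        · exact ⟨t, ht, Or.inl h⟩
        · exact ⟨t, ht, Or.inr h⟩
      · rintro ⟨t, ht, h | h⟩
        · exact Or.inl ⟨t, ht, h⟩
        · exact Or.inr ⟨t, ht, h⟩

theorem pvTriggers_map : pvTriggersA.map String.toList = pvTriggersB := rfl

-- ===== VERDICT (by name: the statement is the Claim_ definition above) =====
theorem instruction_needs_research_py_spec : Claim_equal_instruction_needs_research_py := by
  intro instruction _
  unfold Spec_instruction_needs_research_py
  unfold instruction_needs_research_py instruction_needs_research_py_alt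
  rw [pvScan_eq_any_infix, ← pvTriggers_map, List.any_map]
  show (pvTriggersA.any fun token => PySem.Str.isIn token (PySem.Str.lower instruction)) = _
  congr 1
  funext token
  simp only [Function.comp, PySem.Str.isIn_eq, PySem.Str.toList_lower]
  rw [Bool.eq_iff_iff]
  simp [PySem.Chars.isIn_iff_infix]
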